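-- pv_equiv track=rewrite | github.com/cjlee112/reusabletext | graphviz.py | line_iter
-- ===== SOURCE A (Python) =====
-- def line_iter(s):
--     i = 0
--     j = s.find('\n')
--     while j >= 0:
--         yield s[i:j + 1]
--         i = j + 1
--         j = s.find('\n', i)
--     if i < len(s):
--         yield s[i:]
-- ===== SOURCE B (Python) =====
-- def line_iter(s):
--     parts = s.split('\n')
--     for part in parts[:-1]:
--         yield part + '\n'
--     if parts[-1]:
--         yield parts[-1]
-- ===== Notes on version B (the rewrite author's own statement) =====
-- stated objective: idiomatic
-- what changed: A scans the string incrementally with repeated find-newline calls and yields slices; B splits the string on the newline character once, yields each part but the last with a newline re-appended, and the last part only if non-empty.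
import Mathlib
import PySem

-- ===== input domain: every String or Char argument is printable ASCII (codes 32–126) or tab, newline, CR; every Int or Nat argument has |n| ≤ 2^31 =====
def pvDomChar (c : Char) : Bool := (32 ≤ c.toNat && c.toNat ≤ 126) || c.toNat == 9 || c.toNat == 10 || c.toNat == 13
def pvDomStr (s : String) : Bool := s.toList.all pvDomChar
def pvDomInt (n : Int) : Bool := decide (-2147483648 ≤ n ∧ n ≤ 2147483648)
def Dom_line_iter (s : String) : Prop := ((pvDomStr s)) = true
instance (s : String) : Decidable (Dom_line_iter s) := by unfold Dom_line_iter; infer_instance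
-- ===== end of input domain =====

-- B replaces A's incremental find/slice scanning by one split('\n') followed by reassembly (idiomatic, same cost).
-- A is a generator; both ports return the list of yielded lines.

-- ===== PORT A =====
-- A's while loop, on the remaining suffix of the string: j = s.find('\n', i) is
-- PySem.Chars.find on the suffix; s[i:j+1] / s[i:] are the nonnegative slices
-- take (j+1) / drop (j+1) of the suffix (exact: PySem.List.slice_to / slice_from).
def lineIterGo (cs : List Char) : List (List Char) :=
  let j := PySem.Chars.find cs ['\n']
  if h : 0 ≤ j then
    cs.take (j.toNat + 1) :: lineIterGo (cs.drop (j.toNat + 1))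
  else if cs ≠ [] then [cs] else []
termination_by cs.length
decreasing_by
  have hinf : ['\n'] <:+: cs := (PySem.Chars.find_nonneg_iff cs ['\n']).mp h
  have hne : cs ≠ [] := by
    rintro rfl
    simpa using hinf.sublist.length_le
  simp only [List.length_drop]
  have : 0 < cs.length := List.length_pos_iff.mpr hne
  omega

def line_iter (s : String) : List String :=
  (lineIterGo s.toList).map String.ofList

-- ===== PORT B =====
def line_iter_alt (s : String) : List String :=
  let parts := PySem.Chars.splitOn s.toList ['\n']
  parts.dropLast.map (fun p => String.ofList (p ++ ['\n'])) ++
    (if parts.getLastD [] ≠ [] then [String.ofList (parts.getLastD [])] else [])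

-- ===== PRECONDITION & SPEC =====
def Spec_line_iter (s : String) (out : List String) : Prop := out = line_iter_alt s
instance (s : String) (out : List String) : Decidable (Spec_line_iter s out) := by unfold Spec_line_iter; infer_instance

-- ===== CLAIM (what is proved, stated in full; the proofs are below) =====
def Claim_equal_line_iter : Prop := ∀ (s : String), Dom_line_iter s → Spec_line_iter s (line_iter s)

-- ===== LEMMAS AND PROOFS =====

-- simple structural characterisation of split on a single character
def spNl : List Char → List (List Char)
  | [] => [[]]
  | c :: rest =>
    if c = '\n' then [] :: spNl rest
    else
      match spNl rest with
      | [] => [[c]]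
      | p :: ps => (c :: p) :: ps

theorem spNl_ne_nil (cs : List Char) : spNl cs ≠ [] := by
  induction cs with
  | nil => simp [spNl]
  | cons c rest ih =>
    simp only [spNl]
    split_ifs
    · simp
    · cases h : spNl rest <;> simp

theorem splitOn_go_eq (fuel : Nat) (l cur : List Char) (acc : List (List Char))
    (hf : l.length < fuel) :
    PySem.Chars.splitOn.go ['\n'] fuel l cur acc
      = acc.reverse ++ (spNl l).modifyHead (cur.reverse ++ ·) := by
  induction fuel generalizing l cur acc with
  | zero => omega
  | succ f ih =>
    cases l with
    | nil => simp [PySem.Chars.splitOn.go, spNl]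
    | cons c rest =>
      by_cases hc : c = '\n'
      · subst hc
        have hpre : List.isPrefixOf ['\n'] ('\n' :: rest) = true := by
          simp [List.isPrefixOf]
        simp only [PySem.Chars.splitOn.go, hpre, if_pos, List.length_cons, List.length_nil,
          List.drop_succ_cons, List.drop_zero]
        rw [ih rest [] (cur.reverse :: acc) (by simpa using Nat.lt_of_succ_lt_succ hf)]
        simp [spNl]
        cases h : spNl rest with
        | nil => exact absurd h (spNl_ne_nil rest)
        | cons p ps => simp
      · have hpre : List.isPrefixOf ['\n'] (c :: rest) = false := by
          simp [List.isPrefixOf]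
          exact fun h => absurd h.symm hc
        simp only [PySem.Chars.splitOn.go, hpre]
        rw [if_neg (by simp)]
        rw [ih rest (c :: cur) acc (by simpa using Nat.lt_of_succ_lt_succ hf)]
        simp only [spNl, if_neg hc]
        cases h : spNl rest with
        | nil => exact absurd h (spNl_ne_nil rest)
        | cons p ps => simp

theorem splitOn_eq_spNl (cs : List Char) :
    PySem.Chars.splitOn cs ['\n'] = spNl cs := by
  have := splitOn_go_eq (cs.length + 1) cs [] [] (by omega)
  rw [PySem.Chars.splitOn, this]
  cases h : spNl cs <;> simp

theorem spNl_of_not_mem (cs : List Char) (h : '\n' ∉ cs) : spNl cs = [cs] := by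
  induction cs with
  | nil => simp [spNl]
  | cons c rest ih =>
    simp only [List.mem_cons, not_or] at h
    rw [spNl, if_neg (fun hc => h.1 hc.symm), ih h.2]

theorem spNl_append (pre rest : List Char) (h : '\n' ∉ pre) :
    spNl (pre ++ '\n' :: rest) = pre :: spNl rest := by
  induction pre with
  | nil => simp [spNl]
  | cons c p ih =>
    simp only [List.mem_cons, not_or] at h
    rw [List.cons_append, spNl.eq_def]
    simp only [if_neg (fun hc : c = '\n' => h.1 hc.symm)]
    rw [ih h.2]

-- B's core on a char list
def altCore (cs : List Char) : List String :=
  let parts := spNl cs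
  parts.dropLast.map (fun p => String.ofList (p ++ ['\n'])) ++
    (if parts.getLastD [] ≠ [] then [String.ofList (parts.getLastD [])] else [])

theorem altCore_eq (s : String) : line_iter_alt s = altCore s.toList := by
  simp [line_iter_alt, altCore, splitOn_eq_spNl]

theorem main_eq (cs : List Char) : (lineIterGo cs).map String.ofList = altCore cs := by
  induction hn : cs.length using Nat.strong_induction_on generalizing cs with
  | _ n ih =>
    subst hn
    by_cases h : 0 ≤ PySem.Chars.find cs ['\n']
    · -- '\n' occurs; let j be its first index
      set j : Nat := (PySem.Chars.find cs ['\n']).toNat with hj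
      have hspec := PySem.Chars.find_spec h
      obtain ⟨hpref, hmin⟩ := hspec
      have hjle : (PySem.Chars.find cs ['\n'] : Int) ≤ cs.length :=
        PySem.Chars.find_le_length cs ['\n']
      -- cs.drop j starts with '\n'
      obtain ⟨t, ht⟩ := hpref
      have hdropj : cs.drop j = '\n' :: cs.drop (j + 1) := by
        have h1 : cs.drop (j + 1) = (cs.drop j).drop 1 := by
          rw [List.drop_drop]
        rw [h1, ← ht]; simp
      have hjlt : j < cs.length := by
        by_contra hge
        have : cs.drop j = [] := List.drop_eq_nil_of_le (by omega)
        rw [this] at hdropj; simp at hdropj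
      -- no '\n' in the prefix
      have hnot : '\n' ∉ cs.take j := by
        intro hmem
        obtain ⟨i, hi, hgi⟩ := List.getElem_of_mem hmem
        have hilt : i < j := by simp at hi; omega
        apply hmin i hilt
        have : cs.drop i = '\n' :: cs.drop (i + 1) := by
          have h1 : cs.drop i = cs[i] :: cs.drop (i + 1) :=
            List.drop_eq_getElem_cons (by omega)
          rw [List.getElem_take] at hgi
          rw [h1, hgi]
        exact ⟨cs.drop (i + 1), by rw [this]; simp⟩
      have hdecomp : cs = cs.take j ++ '\n' :: cs.drop (j + 1) := by
        conv_lhs => rw [← List.take_append_drop j cs]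
        rw [hdropj]
      -- unfold A one step
      rw [lineIterGo]
      simp only [dif_pos h, List.map_cons, ← hj]
      -- unfold B one step
      have hrest := ih (cs.drop (j + 1)).length (by simp; omega) (cs.drop (j + 1)) rfl
      have hB : altCore cs = String.ofList (cs.take j ++ ['\n']) :: altCore (cs.drop (j + 1)) := by
        unfold altCore
        conv_lhs => rw [hdecomp]
        rw [spNl_append _ _ hnot]
        cases hsp : spNl (cs.drop (j + 1)) with
        | nil => exact absurd hsp (spNl_ne_nil _)
        | cons p ps => simp
      rw [hB, ← hrest]
      congr 1
      rw [List.take_add]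
      congr 1
      rw [hdropj]; rfl
    · -- no '\n' in cs
      have hfind : PySem.Chars.find cs ['\n'] = -1 := by
        have := PySem.Chars.neg_one_le_find cs ['\n']
        omega
      have hnin : '\n' ∉ cs := by
        intro hmem
        have : ['\n'] <:+: cs := by
          obtain ⟨l1, l2, hl⟩ := List.append_of_mem hmem
          exact ⟨l1, l2, by rw [hl]; simp⟩
        exact h ((PySem.Chars.find_nonneg_iff cs ['\n']).mpr this)
      rw [lineIterGo]
      simp only [dif_neg h]
      unfold altCore
      rw [spNl_of_not_mem cs hnin]
      by_cases hcs : cs = []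
      · subst hcs; simp
      · simp [hcs]

-- ===== VERDICT (by name: the statement is the Claim_ definition above) =====
theorem line_iter_spec : Claim_equal_line_iter := by
  intro s _
  unfold Spec_line_iter line_iter
  rw [altCore_eq, main_eq]
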